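-- pv_equiv track=rewrite | github.com/HOCEBRANCHAI/updated--tr | app.py | _is_credit_note
-- ===== SOURCE A (Python) =====
-- def _is_credit_note(invoice_text: str, invoice_number: str = None) -> bool:
--     """
--     Detects if a document is a credit note by checking for credit note keywords.
--     """
--     if not invoice_text:
--         return False
--
--     text_lower = invoice_text.lower()
--     invoice_num_lower = (invoice_number or "").lower()
--
--     # Keywords that indicate a credit note
--     credit_note_keywords = [
--         "credit note",
--         "creditnote",
--         "credit memo",
--         "creditmemo",
--         "creditnota",
--         "credit nota",
--         "nota de credito",
--         "nota de crédito",
--         "avoir",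
--         "gutschrift",
--         "nota di credito",
--         "crédit",
--         "cn-",
--         "-cn",
--         "cn:",
--         "credit:"
--     ]
--
--     # Check if any keyword appears in the text
--     for keyword in credit_note_keywords:
--         if keyword in text_lower or keyword in invoice_num_lower:
--             return True
--
--     return False
-- ===== SOURCE B (Python) =====
-- CREDIT_NOTE_KEYWORDS = [
--     "credit note",
--     "creditnote",
--     "credit memo",
--     "creditmemo",
--     "creditnota",
--     "credit nota",
--     "nota de credito",
--     "nota de cr\u00e9dito",
--     "avoir",
--     "gutschrift",
--     "nota di credito",
--     "cr\u00e9dit",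
--     "cn-",
--     "-cn",
--     "cn:",
--     "credit:",
-- ]
--
--
-- def _stream_match(s: str) -> bool:
--     """One-pass multi-pattern matcher: walk the string once, maintaining the
--     set of active partial matches (keyword, chars matched so far) and
--     advancing / spawning them at each character, reporting a hit as soon as
--     one keyword completes."""
--     active = []  # list of (keyword, matched_length), 0 < matched_length < len(keyword)
--     for ch in s:
--         nxt = []
--         for k, j in active + [(k, 0) for k in CREDIT_NOTE_KEYWORDS]:
--             if k[j] == ch:
--                 if j + 1 == len(k):
--                     return True
--                 nxt.append((k, j + 1))
--         active = nxt
--     return False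
--
--
-- def _is_credit_note(invoice_text: str, invoice_number: str = None) -> bool:
--     if not invoice_text:
--         return False
--     return _stream_match(invoice_text.lower()) or _stream_match((invoice_number or "").lower())
-- ===== Notes on version B (the rewrite author's own statement) =====
-- stated objective: alternative
-- what changed: Replaces A's keyword-major substring loop ('k in text' per keyword) by a streaming one-pass multi-pattern matcher that walks each lowered string once, maintaining a worklist of active partial matches (keyword, matched length) that is advanced or spawned at every character and reports as soon as any keyword completes.
import Mathlib
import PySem

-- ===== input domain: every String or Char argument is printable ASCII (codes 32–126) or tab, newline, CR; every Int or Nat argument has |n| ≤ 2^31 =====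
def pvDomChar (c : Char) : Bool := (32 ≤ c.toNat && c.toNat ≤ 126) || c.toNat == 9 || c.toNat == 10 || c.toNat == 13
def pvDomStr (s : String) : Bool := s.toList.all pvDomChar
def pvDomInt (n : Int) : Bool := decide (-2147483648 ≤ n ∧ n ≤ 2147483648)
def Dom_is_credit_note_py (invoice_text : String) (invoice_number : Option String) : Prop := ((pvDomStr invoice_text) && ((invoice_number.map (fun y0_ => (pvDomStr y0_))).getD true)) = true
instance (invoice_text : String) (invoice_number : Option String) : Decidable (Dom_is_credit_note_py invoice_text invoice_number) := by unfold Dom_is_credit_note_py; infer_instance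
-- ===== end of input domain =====

-- B replaces A's keyword-major 'in' loop with a streaming one-pass multi-pattern matcher over each lowered string (alternative structure, not claimed faster).


-- ===== PORT A =====
def pvKeywordsA : List String :=
  ["credit note", "creditnote", "credit memo", "creditmemo", "creditnota",
   "credit nota", "nota de credito", "nota de crédito", "avoir", "gutschrift",
   "nota di credito", "crédit", "cn-", "-cn", "cn:", "credit:"]

def is_credit_note_py (invoice_text : String) (invoice_number : Option String) : Bool :=
  if invoice_text.toList = [] then false   -- 'if not invoice_text'
  else
    let text_lower := PySem.Str.lower invoice_text
    let invoice_num_lower := PySem.Str.lower (invoice_number.getD "")  -- (invoice_number or "").lower()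
    -- 'for keyword in …: if keyword in text_lower or keyword in invoice_num_lower: return True' / 'return False'
    pvKeywordsA.any (fun k => PySem.Str.isIn k text_lower || PySem.Str.isIn k invoice_num_lower)

-- ===== PORT B =====
def pvKeywordsB : List (List Char) :=
  ["credit note".toList, "creditnote".toList, "credit memo".toList, "creditmemo".toList,
   "creditnota".toList, "credit nota".toList, "nota de credito".toList, "nota de crédito".toList,
   "avoir".toList, "gutschrift".toList, "nota di credito".toList, "crédit".toList,
   "cn-".toList, "-cn".toList, "cn:".toList, "credit:".toList]

-- inner 'for k, j in …' loop of _stream_match: 'none' = a keyword completed ('return True'), 'some nxt' = new worklist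
def pvAdvance (ch : Char) : List (List Char × Nat) → Option (List (List Char × Nat))
  | [] => some []
  | (k, j) :: rest =>
    if PySem.List.pyGet? k (j : Int) = some ch then    -- 'k[j] == ch' (j is always in range here)
      if j + 1 = k.length then none                    -- 'return True'
      else (pvAdvance ch rest).map (fun ns => (k, j + 1) :: ns)   -- 'nxt.append((k, j+1))'
    else pvAdvance ch rest

-- _stream_match: one pass over the characters, threading the worklist of active partial matches
def pvStream (s : List Char) : Bool :=
  (s.foldl
    (fun st ch =>
      match st with
      | none => none
      | some active => pvAdvance ch (active ++ pvKeywordsB.map (fun k => (k, 0))))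
    (some [])).isNone

def is_credit_note_py_alt (invoice_text : String) (invoice_number : Option String) : Bool :=
  if invoice_text.toList = [] then false
  else
    pvStream (PySem.Chars.lower invoice_text.toList)
      || pvStream (PySem.Chars.lower (invoice_number.getD "").toList)

-- ===== PRECONDITION & SPEC =====
def Spec_is_credit_note_py (invoice_text : String) (invoice_number : Option String) (out : Bool) : Prop := out = is_credit_note_py_alt invoice_text invoice_number
instance (invoice_text : String) (invoice_number : Option String) (out : Bool) : Decidable (Spec_is_credit_note_py invoice_text invoice_number out) := by unfold Spec_is_credit_note_py; infer_instance

-- ===== CLAIM (what is proved, stated in full; the proofs are below) =====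
def Claim_equal_is_credit_note_py : Prop := ∀ (invoice_text : String) (invoice_number : Option String), Dom_is_credit_note_py invoice_text invoice_number → Spec_is_credit_note_py invoice_text invoice_number (is_credit_note_py invoice_text invoice_number)

-- ===== LEMMAS AND PROOFS =====

theorem pvAdvance_eq_none_iff (ch : Char) (L : List (List Char × Nat)) :
    pvAdvance ch L = none ↔
      ∃ p ∈ L, PySem.List.pyGet? p.1 (p.2 : Int) = some ch ∧ p.2 + 1 = p.1.length := by
  induction L with
  | nil => simp [pvAdvance]
  | cons hd tl ih =>
    obtain ⟨k, j⟩ := hd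
    simp only [pvAdvance]
    split_ifs with h1 h2
    · exact iff_of_true rfl ⟨(k, j), List.mem_cons_self, h1, h2⟩
    · simp only [Option.map_eq_none_iff, ih, List.mem_cons]
      constructor
      · rintro ⟨p, hp, h⟩; exact ⟨p, Or.inr hp, h⟩
      · rintro ⟨p, hp | hp, h⟩
        · subst hp; exact absurd h.2 h2
        · exact ⟨p, hp, h⟩
    · rw [ih]
      constructor
      · rintro ⟨p, hp, h⟩; exact ⟨p, List.mem_cons_of_mem _ hp, h⟩
      · rintro ⟨p, hp, h⟩
        rcases List.mem_cons.mp hp with hp | hp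
        · subst hp; exact absurd h.1 h1
        · exact ⟨p, hp, h⟩

theorem pvAdvance_mem_iff (ch : Char) (L N : List (List Char × Nat))
    (h : pvAdvance ch L = some N) (k : List Char) (j' : Nat) :
    (k, j') ∈ N ↔ ∃ j, (k, j) ∈ L ∧ j' = j + 1 ∧
      PySem.List.pyGet? k (j : Int) = some ch ∧ j + 1 ≠ k.length := by
  induction L generalizing N with
  | nil =>
    simp only [pvAdvance] at h
    cases h; simp
  | cons hd tl ih =>
    obtain ⟨k0, j0⟩ := hd
    simp only [pvAdvance] at h
    split_ifs at h with h1 h2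
    · rcases Option.map_eq_some_iff.mp h with ⟨ns, hns, rfl⟩
      simp only [List.mem_cons, Prod.mk.injEq, ih ns hns]
      constructor
      · rintro (⟨rfl, rfl⟩ | ⟨j, hj, rfl, hg, hne⟩)
        · exact ⟨j0, Or.inl ⟨rfl, rfl⟩, rfl, h1, h2⟩
        · exact ⟨j, Or.inr hj, rfl, hg, hne⟩
      · rintro ⟨j, hj, rfl, hg, hne⟩
        rcases hj with ⟨rfl, rfl⟩ | hj
        · exact Or.inl ⟨rfl, rfl⟩
        · exact Or.inr ⟨j, hj, rfl, hg, hne⟩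
    · rw [ih _ h]
      constructor
      · rintro ⟨j, hj, rfl, hg, hne⟩; exact ⟨j, List.mem_cons_of_mem _ hj, rfl, hg, hne⟩
      · rintro ⟨j, hj, rfl, hg, hne⟩
        rcases List.mem_cons.mp hj with hj | hj
        · cases hj; exact absurd h1 (by simp_all)
        · exact ⟨j, hj, rfl, hg, hne⟩
theorem pvSuffix_snoc {l p : List Char} {c : Char} (h : l <:+ p) : l ++ [c] <:+ p ++ [c] := by
  obtain ⟨t, rfl⟩ := h; exact ⟨t, by simp⟩

theorem pvSuffix_snoc_inv {l p : List Char} {c : Char} (hne : l ≠ [])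
    (h : l <:+ p ++ [c]) : ∃ l', l = l' ++ [c] ∧ l' <:+ p := by
  obtain ⟨t, ht⟩ := h
  rcases l.eq_nil_or_concat with rfl | ⟨l', d, rfl⟩
  · exact absurd rfl hne
  · rw [List.concat_eq_append, ← List.append_assoc] at ht
    have h2 := List.append_inj_right' ht (by rfl)
    have h1 := List.append_inj_left' ht (by rfl)
    have : d = c := by simpa using h2
    subst this
    exact ⟨l', List.concat_eq_append .., ⟨t, h1⟩⟩

theorem pvKw_ne_nil : ∀ k ∈ pvKeywordsB, k ≠ [] := by decide

def pvInv (p : List Char) (st : Option (List (List Char × Nat))) : Prop :=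
  (st = none ↔ ∃ k ∈ pvKeywordsB, k <:+: p) ∧
  (∀ A, st = some A → ∀ k j, (k, j) ∈ A ↔
      (k ∈ pvKeywordsB ∧ 1 ≤ j ∧ j < k.length ∧ k.take j <:+ p))

-- candidate-list membership: the fresh (k,0) pairs merge uniformly with the active ones
theorem pvCand_mem (p : List Char) (A : List (List Char × Nat))
    (hA : ∀ k j, (k, j) ∈ A ↔ (k ∈ pvKeywordsB ∧ 1 ≤ j ∧ j < k.length ∧ k.take j <:+ p))
    (k : List Char) (j : Nat) :
    (k, j) ∈ A ++ pvKeywordsB.map (fun k => (k, 0)) ↔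
      (k ∈ pvKeywordsB ∧ j < k.length ∧ k.take j <:+ p) := by
  simp only [List.mem_append, hA, List.mem_map, Prod.mk.injEq]
  constructor
  · rintro (⟨hk, _, hlt, hs⟩ | ⟨k', hk', rfl, rfl⟩)
    · exact ⟨hk, hlt, hs⟩
    · exact ⟨hk', List.length_pos_of_ne_nil (pvKw_ne_nil _ hk'), by simp⟩
  · rintro ⟨hk, hlt, hs⟩
    rcases Nat.eq_zero_or_pos j with rfl | hj
    · exact Or.inr ⟨k, hk, rfl, rfl⟩
    · exact Or.inl ⟨hk, hj, hlt, hs⟩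

theorem pvTake_succ_suffix {k p : List Char} {c : Char} {j : Nat} (hj : j < k.length)
    (hg : k[j]? = some c) (hs : k.take j <:+ p) : k.take (j + 1) <:+ p ++ [c] := by
  rw [List.take_succ, hg]
  exact pvSuffix_snoc hs

def pvStep (st : Option (List (List Char × Nat))) (ch : Char) : Option (List (List Char × Nat)) :=
  match st with
  | none => none
  | some active => pvAdvance ch (active ++ pvKeywordsB.map (fun k => (k, 0)))

theorem pvInv_step (p : List Char) (ch : Char) (st : Option (List (List Char × Nat)))
    (h : pvInv p st) :
    pvInv (p ++ [ch]) (pvStep st ch) := by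
  obtain ⟨h1, h2⟩ := h
  unfold pvStep
  cases st with
  | none =>
    refine ⟨iff_of_true rfl ?_, by simp⟩
    obtain ⟨k, hk, hki⟩ := h1.mp rfl
    exact ⟨k, hk, hki.trans (List.prefix_append p [ch]).isInfix⟩
  | some A =>
    have hA := h2 A rfl
    have hC := pvCand_mem p A hA
    have hnone : ¬ ∃ k ∈ pvKeywordsB, k <:+: p := fun hx => by cases h1.mpr hx
    constructor
    · -- hit ↔ some keyword is an infix of p ++ [ch]
      rw [pvAdvance_eq_none_iff]
      constructor
      · rintro ⟨⟨k, j⟩, hm, hg, hlen⟩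
        simp only at hg hlen
        rw [hC] at hm
        obtain ⟨hk, hlt, hs⟩ := hm
        refine ⟨k, hk, ?_⟩
        have := pvTake_succ_suffix hlt (by simpa using hg) hs
        rw [hlen, List.take_length] at this
        exact this.isInfix
      · rintro ⟨k, hk, hki⟩
        obtain ⟨s, t, hst⟩ := hki
        rcases t.eq_nil_or_concat with rfl | ⟨t', c, rfl⟩
        · -- k is a suffix of p ++ [ch]
          rw [List.append_nil] at hst
          have hksuf : k <:+ p ++ [ch] := ⟨s, hst⟩
          obtain ⟨l', rfl, hl'⟩ := pvSuffix_snoc_inv (pvKw_ne_nil _ hk) hksuf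
          refine ⟨(l' ++ [ch], l'.length), ?_, ?_, ?_⟩
          · rw [hC]
            exact ⟨hk, by simp, by simpa [List.take_left] using hl'⟩
          · simp [PySem.List.pyGet?_natCast]
          · simp
        · -- then k would already be an infix of p, contradicting st = some A
          exfalso
          apply hnone
          refine ⟨k, hk, s, t', ?_⟩
          rw [List.concat_eq_append, ← List.append_assoc] at hst
          exact List.append_inj_left' hst (by rfl)
    · -- survivors ↔ proper partial matches of p ++ [ch]
      intro N hN k j'
      rw [pvAdvance_mem_iff ch _ N hN]
      constructor
      · rintro ⟨j, hm, rfl, hg, hne⟩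
        rw [hC] at hm
        obtain ⟨hk, hlt, hs⟩ := hm
        exact ⟨hk, by omega, by omega, pvTake_succ_suffix hlt (by simpa using hg) hs⟩
      · rintro ⟨hk, hj1, hjlt, hs⟩
        have htk : k.take j' = k.take (j' - 1) ++ (k[j' - 1]?).toList := by
          rw [← List.take_succ]; congr 1; omega
        have hgj : ∃ c0, k[j' - 1]? = some c0 := by
          have : j' - 1 < k.length := by omega
          exact ⟨k[j' - 1], List.getElem?_eq_getElem this⟩
        obtain ⟨c0, hc0⟩ := hgj
        rw [htk, hc0] at hs
        obtain ⟨l2, hl2, hl2s⟩ := pvSuffix_snoc_inv (by simp) hs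
        -- from (take (j'-1)) ++ [c0] = l2 ++ [ch]: c0 = ch and take (j'-1) <:+ p
        have hc : c0 = ch := by
          have := List.append_inj_right' hl2 (by rfl)
          simpa using this
        have hpre : k.take (j' - 1) = l2 := List.append_inj_left' hl2 (by rfl)
        refine ⟨j' - 1, ?_, by omega, ?_, by omega⟩
        · rw [hC]
          exact ⟨hk, by omega, hpre ▸ hl2s⟩
        · rw [PySem.List.pyGet?_natCast, hc0, hc]

theorem pvInv_foldl (s : List Char) (p : List Char) (st : Option (List (List Char × Nat)))
    (h : pvInv p st) :
    pvInv (p ++ s) (s.foldl pvStep st) := by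
  induction s generalizing p st with
  | nil => simpa using h
  | cons c s' ih =>
    have h' := pvInv_step p c st h
    have := ih (p ++ [c]) _ h'
    simpa [List.append_assoc] using this

theorem pvInv_init : pvInv [] (some []) := by
  constructor
  · simp only [reduceCtorEq, false_iff]
    rintro ⟨k, hk, hki⟩
    exact pvKw_ne_nil k hk (List.eq_nil_of_infix_nil hki)
  · intro A hA k j
    cases hA
    simp only [List.not_mem_nil, false_iff]
    rintro ⟨hk, hj1, hjlt, hs⟩
    have := List.eq_nil_of_suffix_nil hs
    have hl : (k.take j).length = j := by simp; omega
    rw [this] at hl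
    simp at hl
    omega

theorem pvStream_eq_isIn (s : List Char) :
    pvStream s = pvKeywordsB.any (fun k => PySem.Chars.isIn k s) := by
  have h := pvInv_foldl s [] (some []) pvInv_init
  rw [List.nil_append] at h
  show (s.foldl pvStep (some [])).isNone = _
  rw [Bool.eq_iff_iff]
  rw [Option.isNone_iff_eq_none, h.1]
  simp only [List.any_eq_true, PySem.Chars.isIn_iff_infix]

theorem pvKwB_eq : pvKeywordsB = pvKeywordsA.map String.toList := rfl

-- ===== VERDICT (by name: the statement is the Claim_ definition above) =====
theorem is_credit_note_py_spec : Claim_equal_is_credit_note_py := by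
  intro invoice_text invoice_number _
  unfold Spec_is_credit_note_py is_credit_note_py is_credit_note_py_alt
  by_cases hE : invoice_text.toList = []
  · simp [hE]
  · simp only [hE, if_false, pvStream_eq_isIn]
    rw [Bool.eq_iff_iff]
    simp only [List.any_eq_true, Bool.or_eq_true, PySem.Str.isIn_eq, PySem.Str.toList_lower]
    constructor
    · rintro ⟨k, hk, h | h⟩
      · exact Or.inl ⟨k.toList, by rw [pvKwB_eq]; exact List.mem_map_of_mem hk, h⟩
      · exact Or.inr ⟨k.toList, by rw [pvKwB_eq]; exact List.mem_map_of_mem hk, h⟩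
    · rintro (⟨k, hk, h⟩ | ⟨k, hk, h⟩) <;>
        (rw [pvKwB_eq] at hk; obtain ⟨ks, hks, rfl⟩ := List.mem_map.mp hk)
      · exact ⟨ks, hks, Or.inl h⟩
      · exact ⟨ks, hks, Or.inr h⟩
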